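-- pv_equiv track=rewrite | github.com/zaoyuaner/Learning-materials | python1812/python_1/8_函数/代码/11_day8work.py | sumNum
-- ===== SOURCE A (Python) =====
-- def sumNum(x,y):
-- 	list1 = []
-- 	for i in range(1,y+1):
-- 		list1.append(i)        # [1,2,3,4,5]
-- 	sum = 0
-- 	for j in list1:
-- 		sum += j*10**(y-j)
-- 	return sum*x
-- ===== SOURCE B (Python) =====
-- def sumNum(x, y):
--     # closed form: sum_{j=1..y} j*10**(y-j) = (10**(y+1) - 9*y - 10) // 81
--     if y <= 0:
--         return 0
--     return x * (10 ** (y + 1) - 9 * y - 10) // 81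
-- ===== Notes on version B (the rewrite author's own statement) =====
-- stated objective: faster
-- what changed: replaced the build-a-list-then-loop summation of j*10**(y-j) by the closed form x*(10**(y+1)-9*y-10)//81 using a single exponentiation
import Mathlib
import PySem

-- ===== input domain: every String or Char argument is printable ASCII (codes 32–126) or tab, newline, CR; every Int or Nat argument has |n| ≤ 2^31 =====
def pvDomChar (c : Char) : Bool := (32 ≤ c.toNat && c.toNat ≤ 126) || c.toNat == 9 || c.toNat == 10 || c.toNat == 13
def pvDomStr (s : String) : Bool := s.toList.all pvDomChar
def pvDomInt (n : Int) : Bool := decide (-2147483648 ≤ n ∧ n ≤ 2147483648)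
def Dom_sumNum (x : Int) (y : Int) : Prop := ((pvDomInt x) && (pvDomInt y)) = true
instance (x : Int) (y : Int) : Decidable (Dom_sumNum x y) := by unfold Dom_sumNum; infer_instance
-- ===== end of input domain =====

-- B replaces A's O(y) summation loop with the closed form x*(10^(y+1)-9y-10)//81 (one pow): faster.

-- ===== PORT A =====
-- Note: in the loop j ranges over 1..y, so y - j ≥ 0; (y - j).toNat is exact there.
def sumNum (x : Int) (y : Int) : Int :=
  let list1 := (PySem.List.pyRange 1 (y + 1) 1).foldl (fun l i => l ++ [i]) []
  let sum := list1.foldl (fun s j => s + j * 10 ^ (y - j).toNat) 0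
  sum * x

-- ===== PORT B =====
def sumNum_alt (x : Int) (y : Int) : Int :=
  if y ≤ 0 then 0
  else PySem.Int.floordiv (x * (10 ^ (y + 1).toNat - 9 * y - 10)) 81

-- ===== PRECONDITION & SPEC =====
def Spec_sumNum (x : Int) (y : Int) (out : Int) : Prop := out = sumNum_alt x y
instance (x : Int) (y : Int) (out : Int) : Decidable (Spec_sumNum x y out) := by unfold Spec_sumNum; infer_instance

-- ===== CLAIM (what is proved, stated in full; the proofs are below) =====
def Claim_equal_sumNum : Prop := ∀ (x : Int) (y : Int), Dom_sumNum x y → Spec_sumNum x y (sumNum x y)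

-- ===== LEMMAS AND PROOFS =====

theorem pv_foldl_append : ∀ (l acc : List Int), l.foldl (fun r i => r ++ [i]) acc = acc ++ l := by
  intro l
  induction l with
  | nil => simp
  | cons a t ih => intro acc; simp [List.foldl, ih]

theorem pv_foldl_add (f : Int → Int) :
    ∀ (l : List Int) (init : Int), l.foldl (fun s j => s + f j) init = init + (l.map f).sum := by
  intro l
  induction l with
  | nil => simp
  | cons a t ih => intro init; simp [List.foldl, ih]; ring

-- g n = Σ_{k<n} (1+k)*10^(n-1-k)
def pvG (n : Nat) : Int := ((List.range n).map (fun k => ((1 : Int) + k) * 10 ^ (n - 1 - k))).sum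

theorem pvG_key : ∀ n : Nat, 81 * pvG n = 10 ^ (n + 1) - 9 * n - 10 := by
  intro n
  induction n with
  | zero => simp [pvG]
  | succ n ih =>
    have hshift : ((List.range n).map (fun k => ((1 : Int) + k) * 10 ^ (n - k))).sum = 10 * pvG n := by
      have hc : (List.range n).map (fun k => ((1 : Int) + k) * 10 ^ (n - k))
          = (List.range n).map (fun k => 10 * (((1 : Int) + k) * 10 ^ (n - 1 - k))) := by
        apply List.map_congr_left
        intro k hk
        have hk' : k < n := List.mem_range.mp hk
        have : n - k = (n - 1 - k) + 1 := by omega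
        rw [this, pow_succ]
        ring
      rw [hc, List.sum_map_mul_left]
      rfl
    have hsum : pvG (n + 1)
        = ((List.range n).map (fun k => ((1 : Int) + k) * 10 ^ (n - k))).sum + ((1 : Int) + n) := by
      simp [pvG, List.range_succ]
    rw [hsum]
    have h10 : (10 : Int) ^ (n + 1 + 1) = 10 * 10 ^ (n + 1) := by ring
    push_cast
    rw [mul_add, hshift, h10]
    push_cast at ih ⊢
    nlinarith [ih]

theorem pvSum_eq (y : Int) (hy : 0 < y) :
    ((PySem.List.pyRange 1 (y + 1) 1).map (fun j => j * 10 ^ (y - j).toNat)).sum = pvG y.toNat := by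
  rw [PySem.List.pyRange_one]
  have hT : (y + 1 - 1).toNat = y.toNat := by omega
  rw [hT, List.map_map, pvG]
  congr 1
  apply List.map_congr_left
  intro k hk
  have hk' : k < y.toNat := List.mem_range.mp hk
  simp only [Function.comp]
  have h1 : (y - (1 + (k : Int))).toNat = y.toNat - 1 - k := by omega
  rw [h1]

-- ===== VERDICT (by name: the statement is the Claim_ definition above) =====
theorem sumNum_spec : Claim_equal_sumNum := by
  unfold Claim_equal_sumNum
  intro x y _
  unfold Spec_sumNum sumNum sumNum_alt
  by_cases hy : y ≤ 0
  · have : (PySem.List.pyRange 1 (y + 1) 1) = [] := PySem.List.pyRange_one_eq_nil (by omega)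
    simp [this, hy]
  · have hy' : 0 < y := by omega
    rw [pv_foldl_append, if_neg hy]
    simp only [List.nil_append]
    rw [pv_foldl_add, zero_add, pvSum_eq y hy']
    have hT : (y + 1).toNat = y.toNat + 1 := by omega
    have hnum : x * ((10 : Int) ^ (y + 1).toNat - 9 * y - 10) = 81 * (x * pvG y.toNat) := by
      have h := pvG_key y.toNat
      have hcast : ((y.toNat : Int)) = y := by omega
      rw [hcast] at h
      rw [hT, ← h]
      ring
    rw [hnum]
    unfold PySem.Int.floordiv
    rw [Int.mul_fdiv_cancel_left _ (by norm_num : (81 : Int) ≠ 0)]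
    ring
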